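-- pv_equiv track=rewrite | github.com/erinepshovel-code/UnitCircle | scripts/ucns_flat_kernel.py | _candidate_factor_lengths
-- ===== SOURCE A (Python) =====
-- def _candidate_factor_lengths(L: int) -> list[tuple[int, int]]:
--     out: list[tuple[int, int]] = []
--     for p in range(2, L):
--         if L % p == 0:
--             q = L // p
--             if q > 1:
--                 out.append((p, q))
--     return out
-- ===== SOURCE B (Python) =====
-- def _candidate_factor_lengths(L: int) -> list[tuple[int, int]]:
--     # Trial division up to sqrt(L): collect small divisors ascending and their
--     # large cofactors, then stitch the two halves together.
--     small: list[tuple[int, int]] = []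
--     large: list[tuple[int, int]] = []
--     d = 2
--     while d * d <= L:
--         if L % d == 0:
--             q = L // d
--             small.append((d, q))
--             if q != d:
--                 large.append((q, d))
--         d += 1
--     return small + large[::-1]
-- ===== Notes on version B (the rewrite author's own statement) =====
-- stated objective: faster
-- what changed: B replaces A's scan of every p in range(2, L) by trial division up to sqrt(L): each small divisor d yields its cofactor pair immediately, the small pairs are emitted ascending and the mirrored cofactor pairs are stitched on reversed.
import Mathlib
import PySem

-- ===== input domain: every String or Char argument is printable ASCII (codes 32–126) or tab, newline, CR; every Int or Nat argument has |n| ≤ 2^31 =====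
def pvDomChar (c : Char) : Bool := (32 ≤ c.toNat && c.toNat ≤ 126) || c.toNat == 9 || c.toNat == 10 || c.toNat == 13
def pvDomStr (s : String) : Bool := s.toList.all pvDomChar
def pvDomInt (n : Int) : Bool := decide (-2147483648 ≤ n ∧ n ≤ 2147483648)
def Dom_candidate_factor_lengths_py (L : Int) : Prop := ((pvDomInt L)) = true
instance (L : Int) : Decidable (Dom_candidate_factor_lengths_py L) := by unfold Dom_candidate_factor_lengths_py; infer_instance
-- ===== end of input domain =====

-- B replaces A's O(L) scan by trial division up to √L (pairs stitched back in the same order); proved to return exactly A's list.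

-- ===== PORT A =====
def candidate_factor_lengths_py (L : Int) : List (Int × Int) :=
  (PySem.List.pyRange 2 L 1).foldl (fun out p =>
    if PySem.Int.mod L p == 0 then
      let q := PySem.Int.floordiv L p
      if 1 < q then out ++ [(p, q)] else out
    else out) []

-- ===== PORT B =====
-- the 'while d * d <= L' loop of Source B; the Nat fuel argument is a totality device
-- only: it is always large enough for the guard 'd * d ≤ L' to be the real exit.
def bLoop (L : Int) : Nat → Int → List (Int × Int) → List (Int × Int) →
    List (Int × Int) × List (Int × Int)
  | 0, _, small, large => (small, large)
  | n + 1, d, small, large =>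
    if d * d ≤ L then
      if PySem.Int.mod L d == 0 then
        let q := PySem.Int.floordiv L d
        if q ≠ d then
          bLoop L n (d + 1) (small ++ [(d, q)]) (large ++ [(q, d)])
        else
          bLoop L n (d + 1) (small ++ [(d, q)]) large
      else bLoop L n (d + 1) small large
    else (small, large)

def candidate_factor_lengths_py_alt (L : Int) : List (Int × Int) :=
  let r := bLoop L (L - 1).toNat 2 [] []
  r.1 ++ r.2.reverse

-- ===== PRECONDITION & SPEC =====
def Spec_candidate_factor_lengths_py (L : Int) (out : List (Int × Int)) : Prop := out = candidate_factor_lengths_py_alt L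
instance (L : Int) (out : List (Int × Int)) : Decidable (Spec_candidate_factor_lengths_py L out) := by unfold Spec_candidate_factor_lengths_py; infer_instance

-- ===== CLAIM (what is proved, stated in full; the proofs are below) =====
def Claim_equal_candidate_factor_lengths_py : Prop := ∀ (L : Int), Dom_candidate_factor_lengths_py L → Spec_candidate_factor_lengths_py L (candidate_factor_lengths_py L)

-- ===== LEMMAS AND PROOFS =====

-- the divisors of L in [a, b), each paired with its cofactor
def pvF (L a b : Int) : List (Int × Int) :=
  ((PySem.List.pyRange a b 1).filter (fun p => decide (p ∣ L))).map
    (fun p => (p, PySem.Int.floordiv L p))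

-- the window of divisors d ≤ p ≤ L // d
def pvWindow (L d : Int) : List (Int × Int) := pvF L d (PySem.Int.floordiv L d + 1)

lemma pvDvdMul (L p : Int) (hp : 0 < p) (h : p ∣ L) : PySem.Int.floordiv L p * p = L := by
  rw [PySem.Int.floordiv_eq_ediv_of_pos hp]
  exact Int.ediv_mul_cancel h

lemma pvGap (L d p : Int) (hd : 0 < d) (hp : 0 < p) (hdvd : p ∣ L)
    (h1 : PySem.Int.floordiv L (d + 1) < p) (h2 : p ≤ PySem.Int.floordiv L d) :
    d ∣ L ∧ p = PySem.Int.floordiv L d := by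
  have hk := pvDvdMul L p hp hdvd
  set k := PySem.Int.floordiv L p with hkdef
  have hpd : p * d ≤ L := (PySem.Int.le_floordiv_iff_mul_le hd).mp h2
  have hdk : d ≤ k := by nlinarith
  have hkd : k ≤ d := by
    by_contra hc
    push Not at hc
    have h3 : p * (d + 1) ≤ L := by nlinarith
    have h4 : p ≤ PySem.Int.floordiv L (d + 1) :=
      (PySem.Int.le_floordiv_iff_mul_le (by omega)).mpr h3
    omega
  have hke : k = d := le_antisymm hkd hdk
  constructor
  · exact ⟨p, by nlinarith⟩
  · rw [eq_comm, PySem.Int.floordiv_eq_iff_of_pos hd]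
    constructor <;> nlinarith

lemma pvF_empty (L a b : Int) (h : b ≤ a) : pvF L a b = [] := by
  unfold pvF
  rw [PySem.List.pyRange_one_eq_nil h]
  rfl

lemma pvF_nil (L a b : Int) (h : ∀ p : Int, a ≤ p → p < b → ¬ p ∣ L) : pvF L a b = [] := by
  unfold pvF
  rw [List.filter_eq_nil_iff.mpr, List.map_nil]
  intro p hp
  rw [PySem.List.mem_pyRange_one] at hp
  simpa using h p hp.1 hp.2

lemma pvF_split (L a m b : Int) (h1 : a ≤ m) (h2 : m ≤ b) :
    pvF L a b = pvF L a m ++ pvF L m b := by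
  unfold pvF
  rw [PySem.List.pyRange_one_append a m b h1 h2, List.filter_append, List.map_append]

lemma pvF_single (L p : Int) (h : p ∣ L) :
    pvF L p (p + 1) = [(p, PySem.Int.floordiv L p)] := by
  unfold pvF
  rw [PySem.List.pyRange_one_singleton]
  simp [h]

lemma pvAnti (L d : Int) (hL : 0 ≤ L) (hd : 0 < d) :
    PySem.Int.floordiv L (d + 1) ≤ PySem.Int.floordiv L d := by
  rw [PySem.Int.le_floordiv_iff_mul_le hd]
  have h1 : PySem.Int.floordiv L (d + 1) * (d + 1) ≤ L :=
    (PySem.Int.le_floordiv_iff_mul_le (by omega)).mp (le_refl _)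
  have h0 : 0 ≤ PySem.Int.floordiv L (d + 1) :=
    (PySem.Int.le_floordiv_iff_mul_le (by omega)).mpr (by omega)
  nlinarith

lemma pvWindow_nil (L d : Int) (hd : 0 < d) (h : L < d * d) : pvWindow L d = [] := by
  unfold pvWindow
  apply pvF_empty
  have := (PySem.Int.floordiv_lt_iff_lt_mul (a := L) (b := d) (q := d) hd).mpr h
  omega

lemma pvW_step_nodvd (L d : Int) (_hL : 0 < L) (hd : 2 ≤ d) (hsq : d * d ≤ L)
    (hnd : ¬ d ∣ L) : pvWindow L d = pvWindow L (d + 1) := by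
  have hd0 : (0 : Int) < d := by omega
  have hdu : d ≤ PySem.Int.floordiv L d :=
    (PySem.Int.le_floordiv_iff_mul_le hd0).mpr hsq
  set u := PySem.Int.floordiv L d with hu
  set u' := PySem.Int.floordiv L (d + 1) with hu'
  have hu'u : u' ≤ u := pvAnti L d (by omega) hd0
  have hhead : pvF L d (d + 1) = [] := by
    apply pvF_nil
    intro p hp1 hp2 hpd
    have : p = d := by omega
    exact hnd (this ▸ hpd)
  by_cases hc : u' < d
  · have hud : u = d := by
      have h1 : L < (d + 1) * d := by
        have := (PySem.Int.floordiv_lt_iff_lt_mul (a := L) (b := d + 1) (q := d) (by omega)).mp hc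
        nlinarith
      have := (PySem.Int.floordiv_lt_iff_lt_mul (a := L) (b := d) (q := d + 1) hd0).mpr h1
      omega
    unfold pvWindow
    rw [← hu, ← hu', hud, pvF_split L d (d + 1) (d + 1) (by omega) (by omega), hhead,
      pvF_empty L (d + 1) (d + 1) (le_refl _), pvF_empty L (d + 1) (u' + 1) (by omega)]
    rfl
  · push Not at hc
    unfold pvWindow
    rw [← hu, ← hu',
      pvF_split L d (d + 1) (u + 1) (by omega) (by omega), hhead,
      pvF_split L (d + 1) (u' + 1) (u + 1) (by omega) (by omega),
      pvF_nil L (u' + 1) (u + 1) ?_]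
    · simp
    · intro p hp1 hp2 hpd
      have hg := pvGap L d p hd0 (by omega) hpd (by omega) (by omega)
      exact hnd hg.1

lemma pvW_step_dvd (L d : Int) (_hL : 0 < L) (hd : 2 ≤ d) (hsq : d * d ≤ L)
    (hdvd : d ∣ L) (hne : PySem.Int.floordiv L d ≠ d) :
    pvWindow L d =
      (d, PySem.Int.floordiv L d) ::
        (pvWindow L (d + 1) ++ [(PySem.Int.floordiv L d, d)]) := by
  have hd0 : (0 : Int) < d := by omega
  have hqd := pvDvdMul L d hd0 hdvd
  set q := PySem.Int.floordiv L d with hq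
  have hdu : d ≤ q := (PySem.Int.le_floordiv_iff_mul_le hd0).mpr hsq
  have hdq : d + 1 ≤ q := by omega
  have hq0 : 0 < q := by omega
  have hqdvd : q ∣ L := ⟨d, hqd.symm⟩
  have hLq : PySem.Int.floordiv L q = d := by
    rw [PySem.Int.floordiv_eq_iff_of_pos hq0]
    constructor <;> nlinarith
  set u' := PySem.Int.floordiv L (d + 1) with hu'
  have hu'q : u' < q := by
    by_contra hc
    push Not at hc
    have : q * (d + 1) ≤ L := (PySem.Int.le_floordiv_iff_mul_le (by omega)).mp hc
    nlinarith
  have hmid : pvF L (d + 1) q = pvWindow L (d + 1) := by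
    unfold pvWindow
    rw [← hu']
    by_cases hc : u' ≤ d
    · rw [pvF_empty L (d + 1) (u' + 1) (by omega)]
      apply pvF_nil
      intro p hp1 hp2 hpd
      have hkq := pvDvdMul L p (by omega) hpd
      set k := PySem.Int.floordiv L p with hk
      have hkd : d + 1 ≤ k := by nlinarith
      have : p ≤ u' := by
        rw [hu', PySem.Int.le_floordiv_iff_mul_le (by omega)]
        nlinarith
      omega
    · push Not at hc
      rw [pvF_split L (d + 1) (u' + 1) q (by omega) (by omega),
        pvF_nil L (u' + 1) q ?_]
      · simp
      · intro p hp1 hp2 hpd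
        have hg := pvGap L d p hd0 (by omega) hpd (by omega) (by omega)
        omega
  unfold pvWindow
  rw [← hq,
    pvF_split L d (d + 1) (q + 1) (by omega) (by omega),
    pvF_split L (d + 1) q (q + 1) (by omega) (by omega),
    pvF_single L d hdvd, pvF_single L q hqdvd, hmid, hLq, ← hq]
  simp [pvWindow]

lemma pvW_eq_case (L d : Int) (_hL : 0 < L) (hd : 2 ≤ d) (_hsq : d * d ≤ L)
    (hdvd : d ∣ L) (heq : PySem.Int.floordiv L d = d) :
    pvWindow L d = [(d, d)] ∧ pvWindow L (d + 1) = [] := by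
  have hd0 : (0 : Int) < d := by omega
  have hqd := pvDvdMul L d hd0 hdvd
  rw [heq] at hqd
  constructor
  · unfold pvWindow
    rw [heq, pvF_single L d hdvd, heq]
  · exact pvWindow_nil L (d + 1) (by omega) (by nlinarith)

lemma pvBLoop_spec (L : Int) (hL : 0 < L) :
    ∀ n (d : Int) small large, (L + 1 - d).toNat ≤ n → 2 ≤ d →
      (bLoop L n d small large).1 ++ (bLoop L n d small large).2.reverse
        = small ++ pvWindow L d ++ large.reverse := by
  intro n
  induction n with
  | zero =>
    intro d s l hn hd
    have hdL : L < d := by omega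
    rw [bLoop, pvWindow_nil L d (by omega) (by nlinarith)]
    simp
  | succ n ih =>
    intro d s l hn hd
    rw [bLoop]
    by_cases hg : d * d ≤ L
    · rw [if_pos hg]
      have hdL : d ≤ L := le_trans (le_mul_of_one_le_left (by omega) (by omega)) hg
      have hn' : (L + 1 - (d + 1)).toNat ≤ n := by omega
      by_cases hdvd : d ∣ L
      · have hmod : (PySem.Int.mod L d == 0) = true := by
          rw [beq_iff_eq]
          exact (PySem.Int.mod_eq_zero_iff_dvd L d).mpr hdvd
        rw [hmod]
        simp only [if_true]
        by_cases hne : PySem.Int.floordiv L d ≠ d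
        · rw [if_pos hne, ih (d + 1) (s ++ [(d, PySem.Int.floordiv L d)])
            (l ++ [(PySem.Int.floordiv L d, d)]) hn' (by omega),
            pvW_step_dvd L d hL hd hg hdvd hne]
          simp
        · push Not at hne
          rw [if_neg (by simp [hne]),
            ih (d + 1) (s ++ [(d, PySem.Int.floordiv L d)]) l hn' (by omega)]
          obtain ⟨h1, h2⟩ := pvW_eq_case L d hL hd hg hdvd hne
          rw [h1, h2, hne]
          simp
      · have hmod : (PySem.Int.mod L d == 0) = false := by
          rw [beq_eq_false_iff_ne]
          intro h
          exact hdvd ((PySem.Int.mod_eq_zero_iff_dvd L d).mp h)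
        rw [hmod]
        simp only [Bool.false_eq_true, if_false]
        rw [ih (d + 1) s l hn' (by omega), pvW_step_nodvd L d hL hd hg hdvd]
    · rw [if_neg hg]
      push Not at hg
      rw [pvWindow_nil L d (by omega) hg]
      simp

lemma pvA_char (L : Int) : candidate_factor_lengths_py L = pvF L 2 L := by
  unfold candidate_factor_lengths_py pvF
  have hfun :
      (fun (out : List (Int × Int)) p =>
        if PySem.Int.mod L p == 0 then
          let q := PySem.Int.floordiv L p
          if 1 < q then out ++ [(p, q)] else out
        else out)
      = (fun out p =>
        if ((PySem.Int.mod L p == 0) && decide (1 < PySem.Int.floordiv L p)) then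
          out ++ [(p, PySem.Int.floordiv L p)] else out) := by
    funext out p
    by_cases h1 : (PySem.Int.mod L p == 0) = true
    · by_cases h2 : 1 < PySem.Int.floordiv L p <;> simp [h1, h2]
    · rw [Bool.not_eq_true] at h1
      simp [h1]
  rw [hfun, PySem.List.foldl_append_if]
  rw [List.nil_append]
  congr 1
  apply List.filter_congr
  intro p hp
  rw [PySem.List.mem_pyRange_one] at hp
  by_cases hdvd : p ∣ L
  · have hp0 : (0 : Int) < p := by omega
    have hkp := pvDvdMul L p hp0 hdvd
    have h2 : 2 ≤ PySem.Int.floordiv L p := by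
      by_contra hc
      push Not at hc
      nlinarith [hp.2]
    have hmod : (PySem.Int.mod L p == 0) = true := by
      rw [beq_iff_eq]
      exact (PySem.Int.mod_eq_zero_iff_dvd L p).mpr hdvd
    simp [hmod, hdvd]
    omega
  · have hmod : (PySem.Int.mod L p == 0) = false := by
      rw [beq_eq_false_iff_ne]
      intro h
      exact hdvd ((PySem.Int.mod_eq_zero_iff_dvd L p).mp h)
    simp [hmod, hdvd]

lemma pvA_eq_window (L : Int) (hL : 0 < L) : pvF L 2 L = pvWindow L 2 := by
  unfold pvWindow
  by_cases hL2 : 2 ≤ L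
  · have hh1 : 1 ≤ PySem.Int.floordiv L 2 :=
      (PySem.Int.le_floordiv_iff_mul_le (by omega)).mpr (by omega)
    have hhL : PySem.Int.floordiv L 2 < L := by
      rw [PySem.Int.floordiv_lt_iff_lt_mul (by omega)]
      omega
    rw [pvF_split L 2 (PySem.Int.floordiv L 2 + 1) L (by omega) (by omega),
      pvF_nil L (PySem.Int.floordiv L 2 + 1) L ?_]
    · simp
    · intro p hp1 hp2 hpd
      have hkp := pvDvdMul L p (by omega) hpd
      set k := PySem.Int.floordiv L p with hk
      have hk1 : 1 < k := by nlinarith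
      have : p ≤ PySem.Int.floordiv L 2 := by
        rw [PySem.Int.le_floordiv_iff_mul_le (by omega)]
        nlinarith
      omega
  · have h1 : L = 1 := by omega
    subst h1
    rw [pvF_empty 1 2 1 (by omega), pvF_empty 1 2 _ (by decide)]

-- ===== VERDICT (by name: the statement is the Claim_ definition above) =====
theorem candidate_factor_lengths_py_spec : Claim_equal_candidate_factor_lengths_py := by
  intro L _
  unfold Spec_candidate_factor_lengths_py candidate_factor_lengths_py_alt
  by_cases hL : 0 < L
  · have hmain := pvBLoop_spec L hL (L - 1).toNat 2 [] [] (by omega) (le_refl 2)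
    rw [pvA_char, pvA_eq_window L hL]
    simpa using hmain.symm
  · rw [pvA_char, pvF_empty L 2 L (by omega),
      show (L - 1).toNat = 0 from by omega, bLoop]
    simp
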